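-- pv_equiv track=rewrite | github.com/cdcoonce/Weather-Adjusted-Generation-Analytics | scripts/build_dashboard_app.py | strip_package_imports
-- ===== SOURCE A (Python) =====
-- _STRIP_PREFIX = "from weather_analytics.dashboard."
--
-- def strip_package_imports(source: str) -> str:
--     """Remove intra-dashboard import lines from source text.
--
--     Any line whose stripped form starts with ``from weather_analytics.dashboard.``
--     is dropped, along with any continuation lines that form part of a
--     parenthesised import block (i.e., lines up to and including the closing
--     ``)``) that immediately follow such a line.
--
--     All other lines (including other ``from weather_analytics.*`` imports) are
--     preserved.
--
--     Parameters
--     ----------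
--     source : str
--         Raw Python source text.
--
--     Returns
--     -------
--     str
--         Source text with matching import blocks removed.
--     """
--     filtered: list[str] = []
--     inside_block = False
--     for line in source.splitlines(keepends=True):
--         if inside_block:
--             # Skip continuation lines until the closing paren is consumed.
--             if line.rstrip().endswith(")") or line.strip() == ")":
--                 inside_block = False
--             continue
--         stripped = line.strip()
--         if stripped.startswith(_STRIP_PREFIX):
--             # Check whether this is a multi-line import (opening paren present
--             # but no closing paren on the same line).
--             if "(" in stripped and ")" not in stripped:
--                 inside_block = True
--             # Either way, skip this opening line.
--             continue
--         filtered.append(line)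
--     return "".join(filtered)
-- ===== SOURCE B (Python) =====
-- _STRIP_PREFIX = "from weather_analytics.dashboard."
--
-- def _is_opener(line):
--     return line.strip().startswith(_STRIP_PREFIX)
--
-- def _is_closer(line):
--     return line.rstrip().endswith(")") or line.strip() == ")"
--
-- def strip_package_imports(source: str) -> str:
--     """Remove intra-dashboard import lines from source text.
--
--     Search-and-splice: repeatedly find the NEXT matching import line,
--     bulk-copy the untouched segment of lines before it, splice out the
--     opener (and, for a multi-line import, everything through the first
--     closing-paren line), and continue on the remainder.
--     """
--     rest = source.splitlines(keepends=True)
--     out = []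
--     while True:
--         j = next((k for k, l in enumerate(rest) if _is_opener(l)), None)
--         if j is None:
--             out += rest
--             break
--         out += rest[:j]
--         stripped = rest[j].strip()
--         tail = rest[j + 1:]
--         if "(" in stripped and ")" not in stripped:
--             k = next((k for k, l in enumerate(tail) if _is_closer(l)), None)
--             tail = [] if k is None else tail[k + 1:]
--         rest = tail
--     return "".join(out)
-- ===== Notes on version B (the rewrite author's own statement) =====
-- stated objective: alternative
-- what changed: Replaces A's line-by-line filter with a cross-iteration inside_block flag by a search-and-splice loop: find the index of the next matching import line, bulk-copy the whole preceding segment, slice out the opener plus (for multi-line imports) everything through the first closing-paren line, and recurse on the remainder.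
import Mathlib
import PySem

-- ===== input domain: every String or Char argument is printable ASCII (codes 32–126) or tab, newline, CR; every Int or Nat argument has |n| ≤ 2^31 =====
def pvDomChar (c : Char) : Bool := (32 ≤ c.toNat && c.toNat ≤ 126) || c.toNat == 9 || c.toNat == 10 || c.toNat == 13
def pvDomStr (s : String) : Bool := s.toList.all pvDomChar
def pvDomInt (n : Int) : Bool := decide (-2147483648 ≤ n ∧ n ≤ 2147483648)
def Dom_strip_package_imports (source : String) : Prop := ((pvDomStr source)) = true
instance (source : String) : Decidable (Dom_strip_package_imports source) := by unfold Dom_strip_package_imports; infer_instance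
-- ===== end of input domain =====

-- B replaces A's flag-carrying line-by-line filter with a search-and-splice loop
-- (find next matching line, bulk-copy the segment before it, slice out the block);
-- objective: alternative decomposition, same cost.

-- source.splitlines(keepends=True): hand-ported (PySem.Str.splitlines has keepends=False).
-- Exact on the stated domain (boundaries there are only \n, \r\n, \r); shared library
-- call of both Pythons, so shared by both ports.
def pvSplitKeep (acc : List Char) : List Char → List (List Char)
  | [] => if acc = [] then [] else [acc.reverse]
  | '\n' :: rest => (acc.reverse ++ ['\n']) :: pvSplitKeep [] rest
  | '\r' :: '\n' :: rest => (acc.reverse ++ ['\r', '\n']) :: pvSplitKeep [] rest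
  | '\r' :: rest => (acc.reverse ++ ['\r']) :: pvSplitKeep [] rest
  | c :: rest => pvSplitKeep (c :: acc) rest

def pvStripPrefix : List Char := "from weather_analytics.dashboard.".toList

-- line.strip().startswith(_STRIP_PREFIX)  (Source B's _is_opener; same test A inlines)
def pvOpener (line : List Char) : Bool :=
  PySem.Chars.startswith (PySem.Chars.strip line) pvStripPrefix

-- line.rstrip().endswith(")") or line.strip() == ")"  (Source B's _is_closer; same test A inlines)
def pvCloses (line : List Char) : Bool :=
  PySem.Chars.endswith (PySem.Chars.rstrip line) [')'] || PySem.Chars.strip line == [')']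

-- ===== PORT A =====
def pvStepA (st : List (List Char) × Bool) (line : List Char) : List (List Char) × Bool :=
  if st.2 then
    if pvCloses line then (st.1, false) else (st.1, true)
  else
    let stripped := PySem.Chars.strip line
    if PySem.Chars.startswith stripped pvStripPrefix then
      if PySem.Chars.isIn ['('] stripped && !(PySem.Chars.isIn [')'] stripped) then
        (st.1, true)
      else (st.1, false)
    else (st.1 ++ [line], st.2)

def strip_package_imports (source : String) : String :=
  String.ofList (((pvSplitKeep [] source.toList).foldl pvStepA ([], false)).1).flatten

-- ===== PORT B =====
-- 'next((k for k, l in enumerate(tail) if _is_closer(l)), None)' then the slice: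
-- tail = [] if k is None else tail[k+1:]
def pvSpliceBlock (ls : List (List Char)) : List (List Char) :=
  match ls.findIdx? pvCloses with
  | none => []
  | some k => ls.drop (k + 1)

theorem pvSpliceBlock_length_le (ls : List (List Char)) : (pvSpliceBlock ls).length ≤ ls.length := by
  unfold pvSpliceBlock
  cases h : ls.findIdx? pvCloses with
  | none => simp
  | some k => simpa using List.length_drop_le (k + 1) ls

-- the outer while loop: find the next opener, copy the segment before it, splice
def pvWalkB (ls : List (List Char)) : List (List Char) :=
  match h : ls.findIdx? pvOpener with
  | none => ls
  | some j =>
    let stripped := PySem.Chars.strip (ls.getD j [])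
    let tail := ls.drop (j + 1)
    ls.take j ++
      pvWalkB (if PySem.Chars.isIn ['('] stripped && !(PySem.Chars.isIn [')'] stripped)
               then pvSpliceBlock tail else tail)
termination_by ls.length
decreasing_by
  have hj : j < ls.length := (List.findIdx?_eq_some_iff_findIdx_eq.mp h).1
  have htail : (ls.drop (j + 1)).length < ls.length := by
    simp [List.length_drop]; omega
  split
  · exact Nat.lt_of_le_of_lt (pvSpliceBlock_length_le _) htail
  · exact htail

def strip_package_imports_alt (source : String) : String :=
  String.ofList ((pvWalkB (pvSplitKeep [] source.toList)).flatten)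

-- ===== PRECONDITION & SPEC =====
def Spec_strip_package_imports (source : String) (out : String) : Prop := out = strip_package_imports_alt source
instance (source : String) (out : String) : Decidable (Spec_strip_package_imports source out) := by unfold Spec_strip_package_imports; infer_instance

-- ===== CLAIM (what is proved, stated in full; the proofs are below) =====
def Claim_equal_strip_package_imports : Prop := ∀ (source : String), Dom_strip_package_imports source → Spec_strip_package_imports source (strip_package_imports source)

-- ===== LEMMAS AND PROOFS =====

theorem walkB_cons_pos (l : List Char) (rest : List (List Char)) (h : pvOpener l = true) :
    pvWalkB (l :: rest) =
      pvWalkB (if PySem.Chars.isIn ['('] (PySem.Chars.strip l) &&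
                  !(PySem.Chars.isIn [')'] (PySem.Chars.strip l))
               then pvSpliceBlock rest else rest) := by
  rw [pvWalkB]
  split
  · next heq => simp [List.findIdx?_cons, h] at heq
  · next j heq =>
      simp only [List.findIdx?_cons, h, cond_true] at heq
      cases heq
      simp

theorem walkB_cons_neg (l : List Char) (rest : List (List Char)) (h : pvOpener l = false) :
    pvWalkB (l :: rest) = l :: pvWalkB rest := by
  conv_lhs => rw [pvWalkB]
  split
  · next heq =>
      have hf : rest.findIdx? pvOpener = none := by
        simpa [List.findIdx?_cons, h] using heq
      rw [pvWalkB]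
      split
      · next heq2 => rfl
      · next j' heq2 => rw [hf] at heq2; cases heq2
  · next j heq =>
      simp only [List.findIdx?_cons, h, cond_false, Bool.false_eq_true, reduceIte,
        Option.map_eq_some_iff] at heq
      obtain ⟨i, hi, rfl⟩ := heq
      have hw : pvWalkB rest =
          List.take i rest ++
            pvWalkB (if PySem.Chars.isIn ['('] (PySem.Chars.strip (rest.getD i [])) &&
                        !(PySem.Chars.isIn [')'] (PySem.Chars.strip (rest.getD i [])))
                     then pvSpliceBlock (rest.drop (i + 1)) else rest.drop (i + 1)) := by
        conv_lhs => rw [pvWalkB]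
        split
        · next heq2 => rw [hi] at heq2; cases heq2
        · next j' heq2 => rw [hi] at heq2; cases heq2; rfl
      rw [hw]
      simp [List.getD]

-- A's skip phase equals B's closer search-and-slice
theorem foldA_skip : ∀ (ls : List (List Char)) (f : List (List Char)),
    (ls.foldl pvStepA (f, true)).1 = ((pvSpliceBlock ls).foldl pvStepA (f, false)).1
  | [], f => rfl
  | l :: rest, f => by
    simp only [List.foldl, pvSpliceBlock, List.findIdx?_cons, pvStepA]
    cases hcl : pvCloses l with
    | true => simp [hcl]
    | false =>
      simp only [hcl, Bool.false_eq_true, reduceIte, if_true]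
      rw [foldA_skip rest f]
      unfold pvSpliceBlock
      cases hf : rest.findIdx? pvCloses with
      | none => simp [hf]
      | some k => simp [hf]

theorem foldA_main : ∀ (ls : List (List Char)) (f : List (List Char)),
    (ls.foldl pvStepA (f, false)).1 = f ++ pvWalkB ls
  | [], f => by rw [pvWalkB]; simp
  | l :: rest, f => by
    simp only [List.foldl]
    by_cases hp : pvOpener l
    · rw [walkB_cons_pos l rest hp]
      have hp' : PySem.Chars.startswith (PySem.Chars.strip l) pvStripPrefix = true := hp
      by_cases hm : PySem.Chars.isIn ['('] (PySem.Chars.strip l) &&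
          !(PySem.Chars.isIn [')'] (PySem.Chars.strip l))
      · have hstep : pvStepA (f, false) l = (f, true) := by simp [pvStepA, hp', hm]
        rw [hstep, foldA_skip rest f, foldA_main (pvSpliceBlock rest) f, if_pos hm]
      · have hstep : pvStepA (f, false) l = (f, false) := by
          simp only [pvStepA, hp', if_true]; simp [hm]
        rw [hstep, foldA_main rest f, if_neg hm]
    · have hp' : PySem.Chars.startswith (PySem.Chars.strip l) pvStripPrefix = false := by
        simpa [pvOpener] using hp
      have hstep : pvStepA (f, false) l = (f ++ [l], false) := by simp [pvStepA, hp']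
      rw [hstep, foldA_main rest (f ++ [l]), walkB_cons_neg l rest (by simpa [pvOpener] using hp)]
      simp
termination_by ls _ => ls.length
decreasing_by
  · exact Nat.lt_of_le_of_lt (pvSpliceBlock_length_le rest) (Nat.lt_succ_self _)
  · exact Nat.lt_succ_self _
  · exact Nat.lt_succ_self _

-- ===== VERDICT (by name: the statement is the Claim_ definition above) =====
theorem strip_package_imports_spec : Claim_equal_strip_package_imports := by
  intro source _
  unfold Spec_strip_package_imports strip_package_imports strip_package_imports_alt
  rw [foldA_main]
  simp
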